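-- pv_equiv track=rewrite | github.com/pypi-data/pypi-mirror-402 | packages/supero/supero-1.0.1-py3-none-any.whl/supero/core.py | _find_similar_schemas
-- ===== SOURCE A (Python) =====
-- def _find_similar_schemas(name: str, available: list) -> list:
--     """
--     Find schemas with similar names (case-insensitive match or close spelling).
--
--     Args:
--         name: Schema name being searched
--         available: List of available schema names
--
--     Returns:
--         list: List of similar schema names
--     """
--     suggestions = []
--     name_lower = name.lower()
--
--     # First, check for exact case-insensitive match
--     for schema in available:
--         if schema.lower() == name_lower:
--             suggestions.append(schema)
--
--     # If no exact match, check for partial matches or typos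
--     if not suggestions:
--         for schema in available:
--             # Check if names are very similar (Levenshtein-like)
--             if (name_lower in schema.lower() or
--                 schema.lower() in name_lower or
--                 name_lower.replace('_', '') == schema.lower()):
--                 suggestions.append(schema)
--
--     return suggestions[:3]  # Return max 3 suggestions
-- ===== SOURCE B (Python) =====
-- def _find_similar_schemas(name: str, available: list) -> list:
--     """Score each schema (0 exact, 1 partial, 2 unrelated); return first 3 of the best score."""
--     name_lower = name.lower()
--     compact = name_lower.replace('_', '')
--
--     def rank(schema):
--         sl = schema.lower()
--         if sl == name_lower:
--             return 0
--         if name_lower in sl or sl in name_lower or compact == sl: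
--             return 1
--         return 2
--
--     ranked = [(rank(s), s) for s in available]
--     best = min((r for r, _ in ranked), default=2)
--     if best == 2:
--         return []
--     return [s for r, s in ranked if r == best][:3]
-- ===== Notes on version B (the rewrite author's own statement) =====
-- stated objective: alternative
-- what changed: Replaces A's exact-pass-then-conditional-fallback-pass structure with a scoring algorithm: every schema gets a similarity rank (0 exact, 1 partial, 2 unrelated), the minimum rank is computed, and the first three schemas achieving that minimum are returned.
import Mathlib
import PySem

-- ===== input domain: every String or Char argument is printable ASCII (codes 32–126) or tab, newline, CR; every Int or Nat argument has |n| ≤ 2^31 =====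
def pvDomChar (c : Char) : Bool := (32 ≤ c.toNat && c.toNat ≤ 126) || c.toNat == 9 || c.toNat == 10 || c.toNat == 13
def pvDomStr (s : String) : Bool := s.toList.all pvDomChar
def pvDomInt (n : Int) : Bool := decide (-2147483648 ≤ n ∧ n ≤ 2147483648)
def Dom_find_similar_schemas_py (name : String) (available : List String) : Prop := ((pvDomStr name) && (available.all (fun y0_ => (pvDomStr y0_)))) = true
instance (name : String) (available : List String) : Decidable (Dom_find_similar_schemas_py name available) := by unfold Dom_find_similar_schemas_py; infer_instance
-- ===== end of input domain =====

-- B replaces A's exact-pass-then-fallback-pass with a scoring algorithm (rank each schema, pick the best-rank group); alternative decomposition, same cost.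

-- ===== PORT A =====
-- A: first loop collects exact case-insensitive matches; if none, a second loop collects partial matches; return suggestions[:3].
def find_similar_schemas_py (name : String) (available : List String) : List String :=
  let name_lower := PySem.Str.lower name
  let suggestions : List String :=
    available.foldl (fun acc schema =>
      if PySem.Str.lower schema == name_lower then acc ++ [schema] else acc) []
  let suggestions :=
    if suggestions = [] then
      available.foldl (fun acc schema =>
        if PySem.Str.isIn name_lower (PySem.Str.lower schema)
            || PySem.Str.isIn (PySem.Str.lower schema) name_lower
            || (PySem.Str.replace name_lower "_" "" == PySem.Str.lower schema) then
          acc ++ [schema]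
        else acc) suggestions
    else suggestions
  PySem.List.slice suggestions none (some 3)

-- ===== PORT B =====
-- B: rank each schema (0 exact, 1 partial, 2 unrelated), compute the minimum rank, return the first 3 schemas of that rank.
def pvRank (name_lower compact schema : String) : Nat :=
  let sl := PySem.Str.lower schema
  if sl == name_lower then 0
  else if PySem.Str.isIn name_lower sl || PySem.Str.isIn sl name_lower || (compact == sl) then 1
  else 2

def find_similar_schemas_py_alt (name : String) (available : List String) : List String :=
  let name_lower := PySem.Str.lower name
  let compact := PySem.Str.replace name_lower "_" ""
  let ranked := available.map (fun s => (pvRank name_lower compact s, s))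
  let best := (PySem.List.min? (ranked.map Prod.fst) (fun r => r)).getD 2
  if best == 2 then []
  else ((ranked.filter (fun p => p.1 == best)).map Prod.snd).take 3

-- ===== PRECONDITION & SPEC =====
def Spec_find_similar_schemas_py (name : String) (available : List String) (out : List String) : Prop := out = find_similar_schemas_py_alt name available
instance (name : String) (available : List String) (out : List String) : Decidable (Spec_find_similar_schemas_py name available out) := by unfold Spec_find_similar_schemas_py; infer_instance

-- ===== CLAIM =====
def Claim_equal_find_similar_schemas_py : Prop := ∀ (name : String) (available : List String), Dom_find_similar_schemas_py name available → Spec_find_similar_schemas_py name available (find_similar_schemas_py name available)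

-- ===== LEMMAS AND PROOFS =====

-- The generic equivalence: A's two staged filters against B's rank/argmin selection,
-- for arbitrary Boolean predicates pE (exact) and pP (partial).
theorem staged_eq_ranked (pE pP : String → Bool) (l : List String) :
    (let s1 := l.filter pE
     let s2 := if s1 = [] then s1 ++ l.filter pP else s1
     s2.take 3)
    = (let ranked := l.map (fun s => ((if pE s then 0 else if pP s then 1 else 2 : Nat), s))
       let best := (PySem.List.min? (ranked.map Prod.fst) (fun r => r)).getD 2
       if best == 2 then []
       else ((ranked.filter (fun p => p.1 == best)).map Prod.snd).take 3) := by
  simp only [List.map_map, List.filter_map, Function.comp_def]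
  by_cases h1 : l.filter pE = []
  · have hE : ∀ x ∈ l, pE x = false := by
      intro x hx; simpa using List.filter_eq_nil_iff.mp h1 x hx
    by_cases h2 : l.filter pP = []
    · have hP : ∀ x ∈ l, pP x = false := by
        intro x hx; simpa using List.filter_eq_nil_iff.mp h2 x hx
      have hbest : (PySem.List.min? (l.map fun s =>
          (if pE s then 0 else if pP s then (1:Nat) else 2)) (fun x => x)).getD 2 = 2 := by
        cases hm : PySem.List.min? (l.map fun s =>
            (if pE s then 0 else if pP s then (1:Nat) else 2)) (fun x => x) with
        | none => rfl
        | some m =>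
          have hmem := PySem.List.min?_mem hm
          obtain ⟨y, hy, hym⟩ := List.mem_map.mp hmem
          simp only [Option.getD_some]
          rw [← hym]; simp [hE y hy, hP y hy]
      simp [h1, h2, hbest]
    · -- some partial match, no exact match: the best rank is 1
      obtain ⟨x, hx, hpx⟩ : ∃ x ∈ l, pP x = true := by
        rcases List.exists_mem_of_ne_nil _ h2 with ⟨y, hy⟩
        exact ⟨y, List.mem_of_mem_filter hy, List.of_mem_filter hy⟩
      have hone : (1 : Nat) ∈ l.map fun s =>
          (if pE s then 0 else if pP s then (1:Nat) else 2) :=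
        List.mem_map.mpr ⟨x, hx, by simp [hE x hx, hpx]⟩
      have hbest : (PySem.List.min? (l.map fun s =>
          (if pE s then 0 else if pP s then (1:Nat) else 2)) (fun x => x)).getD 2 = 1 := by
        cases hm : PySem.List.min? (l.map fun s =>
            (if pE s then 0 else if pP s then (1:Nat) else 2)) (fun x => x) with
        | none =>
          exact absurd ((PySem.List.min?_eq_none_iff _ _).mp hm) (List.ne_nil_of_mem hone)
        | some m =>
          have hle : m ≤ 1 := PySem.List.min?_isMin hm 1 hone
          have hmem := PySem.List.min?_mem hm
          obtain ⟨y, hy, hym⟩ := List.mem_map.mp hmem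
          have : m = 1 ∨ m = 2 := by
            rw [← hym]
            by_cases hpy : pP y = true
            · left; simp [hE y hy, hpy]
            · right; simp [hE y hy, hpy]
          simp only [Option.getD_some]
          omega
      have hfeq : l.filter (fun s =>
          (if pE s then 0 else if pP s then (1:Nat) else 2) == 1) = l.filter pP :=
        List.filter_congr (by
          intro x hx
          simp [hE x hx]
          by_cases hpx : pP x = true <;> simp [hpx])
      simp [h1, hbest, hfeq]
  · -- some exact match: the best rank is 0
    obtain ⟨x, hx, hpx⟩ : ∃ x ∈ l, pE x = true := by
      rcases List.exists_mem_of_ne_nil _ h1 with ⟨y, hy⟩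
      exact ⟨y, List.mem_of_mem_filter hy, List.of_mem_filter hy⟩
    have hzero : (0 : Nat) ∈ l.map fun s =>
        (if pE s then 0 else if pP s then (1:Nat) else 2) :=
      List.mem_map.mpr ⟨x, hx, by simp [hpx]⟩
    have hbest : (PySem.List.min? (l.map fun s =>
        (if pE s then 0 else if pP s then (1:Nat) else 2)) (fun x => x)).getD 2 = 0 := by
      cases hm : PySem.List.min? (l.map fun s =>
          (if pE s then 0 else if pP s then (1:Nat) else 2)) (fun x => x) with
      | none =>
        exact absurd ((PySem.List.min?_eq_none_iff _ _).mp hm) (List.ne_nil_of_mem hzero)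
      | some m =>
        have hle : m ≤ 0 := PySem.List.min?_isMin hm 0 hzero
        simp only [Option.getD_some]; omega
    have hfeq : l.filter (fun s =>
        (if pE s then (0:Nat) else if pP s then 1 else 2) == 0) = l.filter pE :=
      List.filter_congr (by
        intro x hx
        by_cases hpx : pE x = true
        · simp [hpx]
        · simp only [Bool.not_eq_true] at hpx
          simp [hpx]
          by_cases hq : pP x = true <;> simp [hq])
    simp [h1, hbest, hfeq]

theorem find_similar_schemas_py_eq (name : String) (available : List String) :
    find_similar_schemas_py name available = find_similar_schemas_py_alt name available := by
  unfold find_similar_schemas_py find_similar_schemas_py_alt pvRank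
  simp only [PySem.List.foldl_append_if_eq_filter, List.nil_append,
    PySem.List.slice_to _ (by norm_num : (0:Int) ≤ 3)]
  exact staged_eq_ranked
    (fun schema => PySem.Str.lower schema == PySem.Str.lower name)
    (fun schema => PySem.Str.isIn (PySem.Str.lower name) (PySem.Str.lower schema)
        || PySem.Str.isIn (PySem.Str.lower schema) (PySem.Str.lower name)
        || (PySem.Str.replace (PySem.Str.lower name) "_" "" == PySem.Str.lower schema))
    available

-- ===== VERDICT =====
theorem find_similar_schemas_py_spec : Claim_equal_find_similar_schemas_py := by
  intro name available _
  exact find_similar_schemas_py_eq name available
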